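-- pv_equiv track=rewrite | github.com/codacy-open-source-projects-scans/pip | src/pip/_internal/req/req_file.py | break_args_options
-- ===== SOURCE A (Python) =====
-- from typing import (
--     TYPE_CHECKING,
--     Any,
--     Callable,
--     Dict,
--     Generator,
--     Iterable,
--     List,
--     NoReturn,
--     Optional,
--     Tuple,
-- )
--
-- def break_args_options(line: str) -> Tuple[str, str]:
--     """Break up the line into an args and options string.  We only want to shlex
--     (and then optparse) the options, not the args.  args can contain markers
--     which are corrupted by shlex.
--     """
--     tokens = line.split(" ")
--     args = []
--     options = tokens[:]
--     for token in tokens: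
--         if token.startswith("-") or token.startswith("--"):
--             break
--         else:
--             args.append(token)
--             options.pop(0)
--     return " ".join(args), " ".join(options)
-- ===== SOURCE B (Python) =====
-- def break_args_options(line):
--     """Break up the line into an args and options string: find the first token
--     starting with '-' and split there."""
--     tokens = line.split(" ")
--     i = next((idx for idx, t in enumerate(tokens) if t.startswith("-")), len(tokens))
--     return " ".join(tokens[:i]), " ".join(tokens[i:])
-- ===== Notes on version B (the rewrite author's own statement) =====
-- stated objective: idiomatic
-- what changed: Replaces the two-accumulator loop (append to args, pop(0) from a copied options list) by computing the first option-token index and slicing the token list once; the second, redundant prefix test is dropped.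
import Mathlib
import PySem

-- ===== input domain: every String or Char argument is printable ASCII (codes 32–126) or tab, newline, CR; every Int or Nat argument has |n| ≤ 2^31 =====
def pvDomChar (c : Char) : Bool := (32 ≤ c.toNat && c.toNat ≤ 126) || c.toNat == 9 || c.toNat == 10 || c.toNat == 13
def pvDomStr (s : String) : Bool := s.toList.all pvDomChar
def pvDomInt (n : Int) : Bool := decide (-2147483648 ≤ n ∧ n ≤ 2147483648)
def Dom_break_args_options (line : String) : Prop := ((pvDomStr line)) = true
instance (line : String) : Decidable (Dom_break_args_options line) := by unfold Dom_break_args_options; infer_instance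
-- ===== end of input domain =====

-- B replaces A's two-accumulator loop (args.append / options.pop(0)) by computing the first
-- '-'-token index and slicing once (idiomatic; the second, redundant prefix test is dropped).

-- ===== PORT A =====
-- A's loop: walk tokens, append to args and pop(0) from options until a token starts with '-'.
def pvLoopA : List String → List String → List String → List String × List String
  | [], args, options => (args, options)
  | t :: ts, args, options =>
    if PySem.Str.startswith t "-" || PySem.Str.startswith t "--" then (args, options)
    else
      match PySem.List.pop? options 0 with
      | some (_, rest) => pvLoopA ts (args ++ [t]) rest
      | none => (args, options)  -- unreachable: options starts as a copy of tokens

def break_args_options (line : String) : String × String :=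
  let tokens := (PySem.Str.split? line " ").getD []  -- sep " " ≠ "": split? is some here
  let (args, options) := pvLoopA tokens [] tokens
  (PySem.Str.join " " args, PySem.Str.join " " options)

-- ===== PORT B =====
def break_args_options_alt (line : String) : String × String :=
  let tokens := (PySem.Str.split? line " ").getD []  -- sep " " ≠ "": split? is some here
  let i := tokens.findIdx (fun t => PySem.Str.startswith t "-")
  (PySem.Str.join " " (tokens.take i), PySem.Str.join " " (tokens.drop i))

-- ===== PRECONDITION & SPEC =====
def Spec_break_args_options (line : String) (out : String × String) : Prop := out = break_args_options_alt line
instance (line : String) (out : String × String) : Decidable (Spec_break_args_options line out) := by unfold Spec_break_args_options; infer_instance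

-- ===== CLAIM (what is proved, stated in full; the proofs are below) =====
def Claim_equal_break_args_options : Prop := ∀ (line : String), Dom_break_args_options line → Spec_break_args_options line (break_args_options line)

-- ===== LEMMAS AND PROOFS =====

-- a token starting with "--" also starts with "-", so A's disjunction is just startswith "-"
lemma startswith_dashdash_imp (t : String) :
    PySem.Str.startswith t "--" = true → PySem.Str.startswith t "-" = true := by
  simp only [PySem.Str.startswith_eq, PySem.Chars.startswith_iff]
  intro h
  exact List.IsPrefix.trans (by decide) h

lemma pvLoopA_eq (ts : List String) : ∀ (acc : List String),
    pvLoopA ts acc ts =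
      (acc ++ ts.take (ts.findIdx (fun t => PySem.Str.startswith t "-")),
       ts.drop (ts.findIdx (fun t => PySem.Str.startswith t "-"))) := by
  induction ts with
  | nil => intro acc; simp [pvLoopA]
  | cons t ts ih =>
    intro acc
    by_cases h : PySem.Str.startswith t "-" = true
    · have h' : PySem.Chars.startswith t.toList ['-'] = true := by simpa using h
      simp [pvLoopA, List.findIdx_cons, h']
    · have h' : PySem.Chars.startswith t.toList ['-'] = false := by
        simpa using (Bool.not_eq_true _).mp h
      have h2 : PySem.Chars.startswith t.toList ['-', '-'] = false := by
        cases hh : PySem.Chars.startswith t.toList ['-', '-'] with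
        | false => rfl
        | true => exact absurd (startswith_dashdash_imp t (by simpa using hh)) (by simp [h'])
      simp [pvLoopA, List.findIdx_cons, h', h2, ih]

-- ===== VERDICT (by name: the statement is the Claim_ definition above) =====
theorem break_args_options_spec : Claim_equal_break_args_options := by
  intro line _
  unfold Spec_break_args_options break_args_options break_args_options_alt
  simp only []
  rw [pvLoopA_eq]
  simp
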